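-- pv_equiv track=rewrite | github.com/zyf-github100/graduationProject | scripts/select-backend-services.py | select_services
-- ===== SOURCE A (Python) =====
-- SERVICES = [
--     "gateway-service",
--     "auth-service",
--     "master-service",
--     "academic-service",
--     "workflow-service",
--     "billing-service",
--     "notify-service",
-- ]
--
-- GLOBAL_PATHS = (
--     "backend/erp-common/",
--     "backend/pom.xml",
--     "backend/.dockerignore",
--     "backend/Dockerfile.service",
--     "backend/docker-compose.microservice.runtime.yml",
--     "scripts/deploy-remote-service.py",
--     "scripts/select-backend-services.py",
--     ".github/workflows/deploy-backend-services.yml",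
-- )
--
-- def select_services(changed_files: list[str]) -> list[str]:
--     if any(
--         changed_file == path or changed_file.startswith(path)
--         for changed_file in changed_files
--         for path in GLOBAL_PATHS
--     ):
--         return SERVICES
--
--     selected: list[str] = []
--     for service in SERVICES:
--         prefix = f"backend/{service}/"
--         if any(changed_file.startswith(prefix) for changed_file in changed_files):
--             selected.append(service)
--     return selected
-- ===== SOURCE B (Python) =====
-- SERVICES = [
--     "gateway-service",
--     "auth-service",
--     "master-service",
--     "academic-service",
--     "workflow-service",
--     "billing-service",
--     "notify-service",
-- ]
--
-- GLOBAL_PATHS = (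
--     "backend/erp-common/",
--     "backend/pom.xml",
--     "backend/.dockerignore",
--     "backend/Dockerfile.service",
--     "backend/docker-compose.microservice.runtime.yml",
--     "scripts/deploy-remote-service.py",
--     "scripts/select-backend-services.py",
--     ".github/workflows/deploy-backend-services.yml",
-- )
--
--
-- def _parse_service_segment(changed_file):
--     """Leading path segment after 'backend/', only when a '/' follows it."""
--     if changed_file.startswith("backend/"):
--         segment, sep, _ = changed_file[len("backend/"):].partition("/")
--         if sep:
--             return segment
--     return None
--
--
-- def select_services(changed_files: list[str]) -> list[str]:
--     service_set = set(SERVICES)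
--     matched = set()
--     for changed_file in changed_files:
--         if changed_file.startswith(GLOBAL_PATHS):
--             return SERVICES
--         segment = _parse_service_segment(changed_file)
--         if segment is not None and segment in service_set:
--             matched.add(segment)
--     return [s for s in SERVICES if s in matched]
-- ===== Notes on version B (the rewrite author's own statement) =====
-- stated objective: alternative
-- what changed: Replaces the per-service scan over changed_files (one startswith test per service x file) with a single pass over changed_files that parses the leading path segment after 'backend/' (requiring a following '/') and collects it into a matched set, checking the global paths in the same pass with an early return; the result is SERVICES filtered by membership in that set.
import Mathlib
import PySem

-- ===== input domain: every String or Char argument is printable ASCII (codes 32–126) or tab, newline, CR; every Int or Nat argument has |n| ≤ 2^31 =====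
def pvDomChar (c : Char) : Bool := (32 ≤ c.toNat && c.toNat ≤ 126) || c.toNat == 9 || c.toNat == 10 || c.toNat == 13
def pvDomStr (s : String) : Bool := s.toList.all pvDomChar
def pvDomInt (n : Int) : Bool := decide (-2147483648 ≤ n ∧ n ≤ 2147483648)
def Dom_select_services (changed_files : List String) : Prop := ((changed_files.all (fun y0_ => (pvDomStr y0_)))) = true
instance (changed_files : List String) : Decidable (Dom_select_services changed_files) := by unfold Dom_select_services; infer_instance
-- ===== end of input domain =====

-- B replaces the per-service prefix scan by one pass over changed_files that parses the
-- leading segment after 'backend/' into a matched set (objective: alternative decomposition).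

-- shared module constants
def SERVICES : List String :=
  ["gateway-service", "auth-service", "master-service", "academic-service",
   "workflow-service", "billing-service", "notify-service"]

def GLOBAL_PATHS : List String :=
  ["backend/erp-common/", "backend/pom.xml", "backend/.dockerignore",
   "backend/Dockerfile.service", "backend/docker-compose.microservice.runtime.yml",
   "scripts/deploy-remote-service.py", "scripts/select-backend-services.py",
   ".github/workflows/deploy-backend-services.yml"]

-- ===== PORT A =====
def select_services (changed_files : List String) : List String :=
  if changed_files.any (fun changed_file =>
      GLOBAL_PATHS.any (fun path => changed_file == path || PySem.Str.startswith changed_file path)) then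
    SERVICES
  else
    SERVICES.foldl (fun selected service =>
      if changed_files.any (fun changed_file =>
          PySem.Str.startswith changed_file ("backend/" ++ service ++ "/")) then
        selected ++ [service]
      else selected) []

-- ===== PORT B =====
-- _parse_service_segment: 'partition' is ported by hand over toList (exact: seg = chars
-- before the first '/', and the sep test is 'a "/" occurs in the rest').
def parse_service_segment (changed_file : String) : Option String :=
  if PySem.Str.startswith changed_file "backend/" then
    if ((changed_file.toList.drop 8).takeWhile (fun c => c ≠ '/')).length
        ≠ (changed_file.toList.drop 8).length then
      some (String.ofList ((changed_file.toList.drop 8).takeWhile (fun c => c ≠ '/')))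
    else none
  else none

def selLoop (service_set : PySem.Set String) (matched : PySem.Set String) :
    List String → List String
  | [] => SERVICES.filter (fun s => PySem.Set.contains matched s)
  | changed_file :: fs =>
    if GLOBAL_PATHS.any (fun path => PySem.Str.startswith changed_file path) then SERVICES
    else
      match parse_service_segment changed_file with
      | some segment =>
          if PySem.Set.contains service_set segment then
            selLoop service_set (PySem.Set.add matched segment) fs
          else selLoop service_set matched fs
      | none => selLoop service_set matched fs

def select_services_alt (changed_files : List String) : List String :=
  selLoop (PySem.Set.ofList SERVICES) PySem.Set.empty changed_files

-- ===== PRECONDITION & SPEC =====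
def Spec_select_services (changed_files : List String) (out : List String) : Prop := out = select_services_alt changed_files
instance (changed_files : List String) (out : List String) : Decidable (Spec_select_services changed_files out) := by unfold Spec_select_services; infer_instance

-- ===== CLAIM (what is proved, stated in full; the proofs are below) =====
def Claim_equal_select_services : Prop := ∀ (changed_files : List String), Dom_select_services changed_files → Spec_select_services changed_files (select_services changed_files)

-- ===== LEMMAS AND PROOFS =====

-- A's per-file global test equals B's (equality is subsumed by startswith).
theorem global_pred_eq (f p : String) :
    (f == p || PySem.Str.startswith f p) = PySem.Str.startswith f p := by
  cases h : (f == p)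
  · simp
  · simp_all [PySem.Str.startswith_eq, PySem.Chars.startswith_iff]

-- a list whose takeWhile is shorter than itself splits at the first failing char
theorem split_at_slash (l : List Char)
    (h : (l.takeWhile (fun c => decide (c ≠ '/'))).length ≠ l.length) :
    l = l.takeWhile (fun c => decide (c ≠ '/')) ++
        '/' :: (l.dropWhile (fun c => decide (c ≠ '/'))).tail := by
  induction l with
  | nil => simp at h
  | cons a l ih =>
    by_cases ha : a = '/'
    · subst ha
      have hp : ¬ ((fun c => decide (c ≠ '/')) '/' = true) := by simp
      rw [List.takeWhile_cons_of_neg (p := fun c => decide (c ≠ '/')) hp,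
        List.dropWhile_cons_of_neg (p := fun c => decide (c ≠ '/')) hp]
      rfl
    · have hp : (fun c => decide (c ≠ '/')) a = true := by simp [ha]
      rw [List.takeWhile_cons_of_pos (p := fun c => decide (c ≠ '/')) hp] at h ⊢
      rw [List.dropWhile_cons_of_pos (p := fun c => decide (c ≠ '/')) hp]
      have h' : (l.takeWhile (fun c => decide (c ≠ '/'))).length ≠ l.length := by
        simp only [List.length_cons] at h
        omega
      rw [List.cons_append]
      exact congrArg (List.cons a) (ih h')

theorem takeWhile_no_slash (ss t : List Char) (hs : '/' ∉ ss) :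
    (ss ++ '/' :: t).takeWhile (fun c => decide (c ≠ '/')) = ss := by
  induction ss with
  | nil => norm_num
  | cons a ss ih =>
    simp only [List.mem_cons, not_or] at hs
    have hp : (fun c => decide (c ≠ '/')) a = true := by simp; exact fun e => hs.1 e.symm
    rw [List.cons_append, List.takeWhile_cons_of_pos (p := fun c => decide (c ≠ '/')) hp,
      ih hs.2]

-- characterization of parse_service_segment for a slash-free target
theorem parse_iff (f s : String) (hs : '/' ∉ s.toList) :
    (parse_service_segment f = some s) ↔
      PySem.Str.startswith f ("backend/" ++ s ++ "/") = true := by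
  have hB : ("backend/".toList).length = 8 := by decide
  constructor
  · intro h
    unfold parse_service_segment at h
    split at h
    · rename_i hb
      split at h
      · rename_i hlen
        injection h with h'
        have hb' := hb
        rw [PySem.Str.startswith_eq, PySem.Chars.startswith_iff] at hb'
        obtain ⟨t, ht⟩ := hb'
        have hdrop : f.toList.drop 8 = t := by
          rw [← ht, ← hB, List.drop_left]
        have hsplit := split_at_slash (f.toList.drop 8) hlen
        rw [PySem.Str.startswith_eq, PySem.Chars.startswith_iff]
        have htl : ("backend/" ++ s ++ "/").toList
            = "backend/".toList ++ (s.toList ++ ['/']) := by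
          simp
        rw [htl]
        refine ⟨((f.toList.drop 8).dropWhile (fun c => decide (c ≠ '/'))).tail, ?_⟩
        have hf : f.toList = "backend/".toList ++ f.toList.drop 8 := by
          rw [hdrop, ht]
        rw [hf]
        conv_rhs => rw [hsplit]
        rw [← h']
        simp [String.toList_ofList]
      · exact absurd h (by simp)
    · exact absurd h (by simp)
  · intro h
    rw [PySem.Str.startswith_eq, PySem.Chars.startswith_iff] at h
    obtain ⟨t, ht⟩ := h
    have hlist : f.toList = "backend/".toList ++ (s.toList ++ '/' :: t) := by
      rw [← ht]; simp
    have hb : PySem.Str.startswith f "backend/" = true := by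
      rw [PySem.Str.startswith_eq, PySem.Chars.startswith_iff]
      exact ⟨s.toList ++ '/' :: t, hlist.symm⟩
    have hdrop : f.toList.drop 8 = s.toList ++ '/' :: t := by
      rw [hlist, ← hB, List.drop_left]
    unfold parse_service_segment
    rw [if_pos hb, hdrop, takeWhile_no_slash _ _ hs]
    rw [if_pos (by simp)]
    simp [String.ofList_toList]

-- the fold over matched, as a function
def stepMatch (service_set : PySem.Set String) (m : PySem.Set String) (f : String) :
    PySem.Set String :=
  match parse_service_segment f with
  | some seg => if PySem.Set.contains service_set seg then PySem.Set.add m seg else m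
  | none => m

theorem selLoop_eq (sset m : PySem.Set String) (cfs : List String) :
    selLoop sset m cfs =
      if cfs.any (fun f => GLOBAL_PATHS.any (fun p => PySem.Str.startswith f p)) then SERVICES
      else SERVICES.filter (fun s => PySem.Set.contains (cfs.foldl (stepMatch sset) m) s) := by
  induction cfs generalizing m with
  | nil => simp [selLoop]
  | cons f fs ih =>
    by_cases hg : GLOBAL_PATHS.any (fun p => PySem.Str.startswith f p) = true
    · rw [show selLoop sset m (f :: fs) = SERVICES by rw [selLoop, if_pos hg]]
      rw [if_pos (by rw [List.any_cons, hg, Bool.true_or])]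
    · rw [Bool.not_eq_true] at hg
      have hloop : selLoop sset m (f :: fs) = selLoop sset (stepMatch sset m f) fs := by
        rw [selLoop, if_neg (by rw [hg]; simp)]
        unfold stepMatch
        cases parse_service_segment f with
        | none => rfl
        | some seg =>
          rcases Bool.eq_false_or_eq_true (PySem.Set.contains sset seg) with hc | hc <;>
            simp only [hc] <;> rfl
      rw [hloop, ih, List.any_cons, hg, Bool.false_or, List.foldl_cons]

theorem mem_foldl_step (sset m : PySem.Set String) (cfs : List String) (s : String) :
    s ∈ cfs.foldl (stepMatch sset) m ↔
      s ∈ m ∨ ∃ f ∈ cfs, parse_service_segment f = some s ∧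
        PySem.Set.contains sset s = true := by
  induction cfs generalizing m with
  | nil => simp
  | cons f fs ih =>
    rw [List.foldl_cons, ih]
    have hstep : s ∈ stepMatch sset m f ↔
        s ∈ m ∨ (parse_service_segment f = some s ∧ PySem.Set.contains sset s = true) := by
      unfold stepMatch
      cases hp : parse_service_segment f with
      | none => simp
      | some seg =>
        show (s ∈ if PySem.Set.contains sset seg = true then PySem.Set.add m seg else m) ↔
          s ∈ m ∨ (some seg = some s ∧ PySem.Set.contains sset s = true)
        rcases Bool.eq_false_or_eq_true (PySem.Set.contains sset seg) with hc | hc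
        · rw [hc, if_pos rfl, PySem.Set.mem_add]
          constructor
          · rintro (hm | rfl)
            · exact Or.inl hm
            · exact Or.inr ⟨rfl, hc⟩
          · rintro (hm | ⟨hps, _⟩)
            · exact Or.inl hm
            · injection hps with h'; exact Or.inr h'.symm
        · rw [hc, if_neg Bool.false_ne_true]
          constructor
          · exact Or.inl
          · rintro (hm | ⟨hps, hcs⟩)
            · exact hm
            · injection hps with h'; subst h'
              rw [hc] at hcs; cases hcs
    rw [hstep]
    simp only [List.exists_mem_cons_iff]
    tauto

-- services contain no slash
theorem services_no_slash : ∀ s ∈ SERVICES, '/' ∉ s.toList := by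
  intro s hs
  fin_cases hs <;> decide

-- ===== VERDICT (by name: the statement is the Claim_ definition above) =====
theorem select_services_spec : Claim_equal_select_services := by
  intro cfs _
  unfold Spec_select_services select_services select_services_alt
  rw [selLoop_eq]
  have hg : (cfs.any (fun f => GLOBAL_PATHS.any (fun p =>
      f == p || PySem.Str.startswith f p))) =
      (cfs.any (fun f => GLOBAL_PATHS.any (fun p => PySem.Str.startswith f p))) := by
    simp only [global_pred_eq]
  rw [hg]
  split_ifs with h
  · rfl
  · rw [PySem.List.foldl_append_if_eq_filter, List.nil_append]
    refine List.filter_congr (fun s hsmem => ?_)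
    have hsset : PySem.Set.contains (PySem.Set.ofList SERVICES) s = true := by
      rw [PySem.Set.contains_iff, PySem.Set.mem_ofList]; exact hsmem
    rw [Bool.eq_iff_iff, List.any_eq_true, PySem.Set.contains_iff, mem_foldl_step]
    constructor
    · rintro ⟨f, hf, hsw⟩
      exact Or.inr ⟨f, hf, (parse_iff f s (services_no_slash s hsmem)).mpr hsw, hsset⟩
    · rintro (hm | ⟨f, hf, hps, _⟩)
      · exact absurd hm (by simp [PySem.Set.empty])
      · exact ⟨f, hf, (parse_iff f s (services_no_slash s hsmem)).mp hps⟩
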